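-- pv_equiv track=rewrite | github.com/Yansl-1229/Video_processing | steps/streaming_extract.py | _build_segments
-- ===== SOURCE A (Python) =====
-- def _build_segments(filtered_positions, start_line, end_line):
--     if not filtered_positions:
--         return [(start_line, end_line)]
--     segments = []
--     prev = start_line
--     for p in filtered_positions:
--         segments.append((prev, p - 1))
--         prev = p
--     segments.append((prev, end_line))
--     return segments
-- ===== SOURCE B (Python) =====
-- def _build_segments(filtered_positions, start_line, end_line):
--     starts = [start_line] + list(filtered_positions)
--     ends = [p - 1 for p in filtered_positions] + [end_line]
--     return list(zip(starts, ends))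
-- ===== Notes on version B (the rewrite author's own statement) =====
-- stated objective: simpler
-- what changed: Replaces the running-prev accumulator loop (with an empty-input guard) by pairing two derived boundary lists: starts = [start_line]+positions and ends = [p-1 for p]+[end_line], zipped; the guard disappears naturally.
import Mathlib
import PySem

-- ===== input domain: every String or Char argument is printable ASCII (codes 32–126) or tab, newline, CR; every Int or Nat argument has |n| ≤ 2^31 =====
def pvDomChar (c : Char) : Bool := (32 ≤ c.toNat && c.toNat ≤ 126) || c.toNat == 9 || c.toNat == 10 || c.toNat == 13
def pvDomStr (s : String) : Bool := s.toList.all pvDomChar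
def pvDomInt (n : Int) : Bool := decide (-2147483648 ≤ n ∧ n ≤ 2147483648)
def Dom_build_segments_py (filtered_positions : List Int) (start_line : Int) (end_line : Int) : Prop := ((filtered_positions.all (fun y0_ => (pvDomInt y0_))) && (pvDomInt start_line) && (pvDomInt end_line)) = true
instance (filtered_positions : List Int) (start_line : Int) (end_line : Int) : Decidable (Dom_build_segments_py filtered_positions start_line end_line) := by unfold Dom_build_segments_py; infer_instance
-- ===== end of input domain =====

-- B pairs two derived boundary lists with zip instead of A's running-prev loop (objective: simpler).


-- ===== PORT A =====
def build_segments_py (filtered_positions : List Int) (start_line : Int) (end_line : Int) : List (Int × Int) :=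
  if filtered_positions = [] then [(start_line, end_line)]
  else
    let st := filtered_positions.foldl
      (fun (st : List (Int × Int) × Int) p => (st.1 ++ [(st.2, p - 1)], p))
      ([], start_line)
    st.1 ++ [(st.2, end_line)]

-- ===== PORT B =====
-- B: pair the derived boundary lists (starts, ends) with zip — no guard, no accumulator.
def build_segments_py_alt (filtered_positions : List Int) (start_line : Int) (end_line : Int) : List (Int × Int) :=
  List.zip (start_line :: filtered_positions)
           (filtered_positions.map (fun p => p - 1) ++ [end_line])

-- ===== PRECONDITION & SPEC =====
def Spec_build_segments_py (filtered_positions : List Int) (start_line : Int) (end_line : Int) (out : List (Int × Int)) : Prop := out = build_segments_py_alt filtered_positions start_line end_line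
instance (filtered_positions : List Int) (start_line : Int) (end_line : Int) (out : List (Int × Int)) : Decidable (Spec_build_segments_py filtered_positions start_line end_line out) := by unfold Spec_build_segments_py; infer_instance

-- ===== CLAIM (what is proved, stated in full; the proofs are below) =====
def Claim_equal_build_segments_py : Prop := ∀ (filtered_positions : List Int) (start_line : Int) (end_line : Int), Dom_build_segments_py filtered_positions start_line end_line → Spec_build_segments_py filtered_positions start_line end_line (build_segments_py filtered_positions start_line end_line)

-- ===== LEMMAS AND PROOFS =====

-- ===== VERDICT (by name: the statement is the Claim_ definition above) =====
theorem pv_fold_zip (fp : List Int) (s e : Int) (acc : List (Int × Int)) :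
    (fp.foldl (fun (st : List (Int × Int) × Int) p => (st.1 ++ [(st.2, p - 1)], p)) (acc, s)).1 ++
      [((fp.foldl (fun (st : List (Int × Int) × Int) p => (st.1 ++ [(st.2, p - 1)], p)) (acc, s)).2, e)]
      = acc ++ List.zip (s :: fp) (fp.map (fun p => p - 1) ++ [e]) := by
  induction fp generalizing s acc with
  | nil => simp
  | cons p rest ih =>
    simp only [List.foldl_cons, List.map_cons, List.cons_append, List.zip_cons_cons]
    rw [ih]
    simp

theorem build_segments_py_spec : Claim_equal_build_segments_py := by
  intro fp s e _
  unfold Spec_build_segments_py build_segments_py build_segments_py_alt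
  cases fp with
  | nil => simp
  | cons p rest =>
    simp only [reduceCtorEq, if_false]
    exact pv_fold_zip (p :: rest) s e []
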